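-- pv_equiv track=rewrite | github.com/SharuPaul/expready | src/expready/preflight.py | format_grouped_input_errors
-- ===== SOURCE A (Python) =====
-- _GROUP_ORDER = ["metadata", "matrix", "manifest"]
--
-- _GROUP_HINTS = {
--     "metadata": "Verify metadata headers and update options like --metadata-id/--condition/--batch/--pair/--covars.",
--     "matrix": "Fix table delimiters/structure and ensure the matrix file uses a consistent separator.",
--     "manifest": "Verify manifest headers and update options like --manifest-id/--manifest-path/--check-paths.",
-- }
--
-- def format_grouped_input_errors(grouped: dict[str, list[str]]) -> list[str]:
--     lines: list[str] = []
--     ordered_groups = [name for name in _GROUP_ORDER if name in grouped] + [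
--         name for name in grouped if name not in _GROUP_ORDER
--     ]
--     for group in ordered_groups:
--         issues = grouped.get(group, [])
--         if not issues:
--             continue
--         lines.append(f"- {group}:")
--         for issue in issues:
--             lines.append(f"  - {issue}")
--         hint = _GROUP_HINTS.get(group)
--         if hint:
--             lines.append(f"  Hint: {hint}")
--     return lines
-- ===== SOURCE B (Python) =====
-- _GROUP_ORDER = ["metadata", "matrix", "manifest"]
--
-- _GROUP_HINTS = {
--     "metadata": "Verify metadata headers and update options like --metadata-id/--condition/--batch/--pair/--covars.",
--     "matrix": "Fix table delimiters/structure and ensure the matrix file uses a consistent separator.",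
--     "manifest": "Verify manifest headers and update options like --manifest-id/--manifest-path/--check-paths.",
-- }
--
--
-- def _block(group, issues):
--     """Render one group's lines (empty when the group has no issues)."""
--     if not issues:
--         return []
--     block = [f"- {group}:"] + [f"  - {issue}" for issue in issues]
--     if group in _GROUP_HINTS:
--         block.append(f"  Hint: {_GROUP_HINTS[group]}")
--     return block
--
--
-- def format_grouped_input_errors(grouped: dict[str, list[str]]) -> list[str]:
--     # Order the groups with one stable sort keyed by position in _GROUP_ORDER
--     # (unknown groups rank last and keep insertion order), then flatten the
--     # per-group rendered blocks.
--     def rank(name):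
--         return _GROUP_ORDER.index(name) if name in _GROUP_ORDER else len(_GROUP_ORDER)
--
--     return [line
--             for group in sorted(grouped, key=rank)
--             for line in _block(group, grouped[group])]
-- ===== Notes on version B (the rewrite author's own statement) =====
-- stated objective: idiomatic
-- what changed: Replaces A's two filtered comprehensions plus an appending loop with per-group .get lookups by one stable sort of the keys under a rank key (position in _GROUP_ORDER, unknown names ranked last) and a flattening comprehension over per-group rendered blocks.
import Mathlib
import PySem

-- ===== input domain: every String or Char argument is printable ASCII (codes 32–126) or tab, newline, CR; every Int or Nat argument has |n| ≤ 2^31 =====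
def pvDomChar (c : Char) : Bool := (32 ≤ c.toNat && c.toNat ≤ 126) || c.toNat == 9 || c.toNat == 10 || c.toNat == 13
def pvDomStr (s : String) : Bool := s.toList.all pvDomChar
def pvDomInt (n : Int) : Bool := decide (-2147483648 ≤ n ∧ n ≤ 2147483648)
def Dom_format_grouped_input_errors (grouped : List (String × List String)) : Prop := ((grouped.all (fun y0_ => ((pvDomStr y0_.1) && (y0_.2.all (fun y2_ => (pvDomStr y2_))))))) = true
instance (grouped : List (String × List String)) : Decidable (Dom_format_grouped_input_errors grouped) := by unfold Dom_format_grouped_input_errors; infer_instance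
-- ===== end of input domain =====

-- B orders the group names with one stable sort under a rank key (position in _GROUP_ORDER,
-- unknown names ranked last) and flattens per-group rendered blocks, instead of A's two
-- filtered comprehensions plus an appending loop with per-group .get lookups (objective: idiomatic).

-- shared constant tables
def pvGroupOrder : List String := ["metadata", "matrix", "manifest"]

-- _GROUP_HINTS.get(g)
def pvHint? (g : String) : Option String :=
  if g = "metadata" then some "Verify metadata headers and update options like --metadata-id/--condition/--batch/--pair/--covars."
  else if g = "matrix" then some "Fix table delimiters/structure and ensure the matrix file uses a consistent separator."
  else if g = "manifest" then some "Verify manifest headers and update options like --manifest-id/--manifest-path/--check-paths."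
  else none

-- grouped.get(k) / grouped[k] : first-match association-list lookup (dict lookup)
def pvLookup (d : List (String × List String)) (k : String) : Option (List String) :=
  match d with
  | [] => none
  | (a, b) :: rest => if a = k then some b else pvLookup rest k

-- ===== PORT A =====
-- body of A's emission loop, one group name at a time
def pvStepA (grouped : List (String × List String)) (lines : List String) (group : String) : List String :=
  let issues := (pvLookup grouped group).getD []
  if issues = [] then lines
  else
    let lines := lines ++ ["- " ++ group ++ ":"] ++ issues.map (fun i => "  - " ++ i)
    match pvHint? group with
    | some h => if h = "" then lines else lines ++ ["  Hint: " ++ h]   -- 'if hint:' truthiness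
    | none => lines

def format_grouped_input_errors (grouped : List (String × List String)) : List String :=
  let orderedGroups :=
    pvGroupOrder.filter (fun n => (pvLookup grouped n).isSome)
      ++ (grouped.map Prod.fst).filter (fun n => !(pvGroupOrder.contains n))
  orderedGroups.foldl (pvStepA grouped) []

-- ===== PORT B =====
-- _block(group, issues): one group's rendered lines
def pvBlock (group : String) (issues : List String) : List String :=
  if issues = [] then []
  else
    let block := ("- " ++ group ++ ":") :: issues.map (fun i => "  - " ++ i)
    match pvHint? group with                      -- 'if group in _GROUP_HINTS' + lookup
    | some h => block ++ ["  Hint: " ++ h]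
    | none => block

-- rank(name) = _GROUP_ORDER.index(name) if name in _GROUP_ORDER else len(_GROUP_ORDER)
def pvRank (name : String) : Nat :=
  if pvGroupOrder.contains name then (PySem.List.index? pvGroupOrder name).getD 0
  else pvGroupOrder.length

def format_grouped_input_errors_alt (grouped : List (String × List String)) : List String :=
  (PySem.List.sorted (grouped.map Prod.fst) pvRank).flatMap
    (fun group => pvBlock group ((pvLookup grouped group).getD []))

-- ===== PRECONDITION & SPEC =====
-- Pre_ excludes association lists with duplicate keys, which do not represent any Python dict input.
def Pre_format_grouped_input_errors (grouped : List (String × List String)) : Prop :=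
  (grouped.map Prod.fst).Nodup
instance (grouped : List (String × List String)) : Decidable (Pre_format_grouped_input_errors grouped) := by unfold Pre_format_grouped_input_errors; infer_instance

def pvWitness_format_grouped_input_errors : (List (String × List String)) :=
  [("matrix", ["bad delimiter"]), ("zeta", ["odd"]), ("metadata", [])]

def Spec_format_grouped_input_errors (grouped : List (String × List String)) (out : List String) : Prop := out = format_grouped_input_errors_alt grouped
instance (grouped : List (String × List String)) (out : List String) : Decidable (Spec_format_grouped_input_errors grouped out) := by unfold Spec_format_grouped_input_errors; infer_instance

-- ===== CLAIM (what is proved, stated in full; the proofs are below) =====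
def Claim_equal_format_grouped_input_errors : Prop := ∀ (grouped : List (String × List String)), Dom_format_grouped_input_errors grouped → Pre_format_grouped_input_errors grouped → Spec_format_grouped_input_errors grouped (format_grouped_input_errors grouped)

-- ===== LEMMAS AND PROOFS =====

-- the rank key as a four-way case split on the name
theorem pvRank_eq (n : String) :
    pvRank n = if n = "metadata" then 0 else if n = "matrix" then 1
               else if n = "manifest" then 2 else 3 := by
  by_cases h1 : n = "metadata"
  · subst h1; decide
  · by_cases h2 : n = "matrix"
    · subst h2; decide
    · by_cases h3 : n = "manifest"
      · subst h3; decide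
      · simp [pvRank, pvGroupOrder, h1, h2, h3]

theorem pvRank_le_three (n : String) : pvRank n ≤ 3 := by
  rw [pvRank_eq]; split_ifs <;> omega

-- insertBy steps over a head it does not insert before
theorem pvInsertBy_step (before : String → String → Bool) (x y : String)
    (ys : List String) (hy : before x y = false) :
    PySem.List.insertBy before x (y :: ys) = y :: PySem.List.insertBy before x ys := by
  cases ys <;> simp [PySem.List.insertBy, hy]

-- … hence walks past a whole prefix it does not insert before
theorem pvInsertBy_append (before : String → String → Bool) (x : String)
    (l1 l2 : List String) (h : ∀ y ∈ l1, before x y = false) :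
    PySem.List.insertBy before x (l1 ++ l2) = l1 ++ PySem.List.insertBy before x l2 := by
  induction l1 with
  | nil => rfl
  | cons y t ih =>
    rw [List.cons_append, pvInsertBy_step before x y _ (h y List.mem_cons_self),
        ih (fun z hz => h z (List.mem_cons_of_mem _ hz)), List.cons_append]

-- … and drops in front of a suffix it inserts before everywhere
theorem pvInsertBy_cons (before : String → String → Bool) (x : String)
    (l : List String) (h : ∀ y ∈ l, before x y = true) :
    PySem.List.insertBy before x l = x :: l := by
  cases l with
  | nil => rfl
  | cons y t => simp [PySem.List.insertBy, h y List.mem_cons_self]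

-- the stable sort under pvRank is the concatenation of the four rank buckets
theorem pvSorted_shape (ks : List String) :
    PySem.List.sorted ks pvRank =
      ks.filter (fun n => pvRank n == 0) ++ ks.filter (fun n => pvRank n == 1)
        ++ ks.filter (fun n => pvRank n == 2) ++ ks.filter (fun n => pvRank n == 3) := by
  rw [PySem.List.sorted_eq_foldl_insertBy]
  induction ks using List.reverseRecOn with
  | nil => rfl
  | append_singleton t x ih =>
    rw [List.foldl_append, List.foldl_cons, List.foldl_nil, ih]
    simp only [List.filter_append, List.filter_cons, List.filter_nil]
    have hmem : ∀ (i : Nat) (y : String),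
        y ∈ t.filter (fun n => pvRank n == i) → pvRank y = i := by
      intro i y hy
      simpa using (List.mem_filter.mp hy).2
    have hk3 := pvRank_le_three x
    interval_cases hkx : pvRank x
    · -- rank 0: insert at the end of bucket 0
      rw [List.append_assoc, List.append_assoc,
          pvInsertBy_append _ x _ _ (by intro y hy; simp [hmem 0 y hy, hkx]),
          pvInsertBy_cons _ x _ (by
            intro y hy
            simp only [List.mem_append] at hy
            rcases hy with h | h | h
            · simp [hmem 1 y h, hkx]
            · simp [hmem 2 y h, hkx]
            · simp [hmem 3 y h, hkx])]
      simp
    · -- rank 1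
      rw [List.append_assoc,
          pvInsertBy_append _ x _ _ (by
            intro y hy
            simp only [List.mem_append] at hy
            rcases hy with h | h
            · simp [hmem 0 y h, hkx]
            · simp [hmem 1 y h, hkx]),
          pvInsertBy_cons _ x _ (by
            intro y hy
            simp only [List.mem_append] at hy
            rcases hy with h | h
            · simp [hmem 2 y h, hkx]
            · simp [hmem 3 y h, hkx])]
      simp
    · -- rank 2
      rw [pvInsertBy_append _ x _ _ (by
            intro y hy
            simp only [List.mem_append] at hy
            rcases hy with (h | h) | h
            · simp [hmem 0 y h, hkx]
            · simp [hmem 1 y h, hkx]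
            · simp [hmem 2 y h, hkx]),
          pvInsertBy_cons _ x _ (by intro y hy; simp [hmem 3 y hy, hkx])]
      simp
    · -- rank 3: append at the very end
      rw [PySem.List.insertBy_of_forall_not_before _ x _ (by
            intro y hy
            simp only [List.mem_append] at hy
            rcases hy with ((h | h) | h) | h
            · simp [hmem 0 y h, hkx]
            · simp [hmem 1 y h, hkx]
            · simp [hmem 2 y h, hkx]
            · simp [hmem 3 y h, hkx])]
      simp

-- bucket 0/1/2 collapse to an equality filter; bucket 3 is A's "unknown names" filter
theorem pvFilter_rank_known (ks : List String) (i : Nat) (a : String)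
    (hi : (i = 0 ∧ a = "metadata") ∨ (i = 1 ∧ a = "matrix") ∨ (i = 2 ∧ a = "manifest")) :
    ks.filter (fun n => pvRank n == i) = ks.filter (fun n => n == a) := by
  apply List.filter_congr
  intro n _
  rw [pvRank_eq]
  rcases hi with ⟨hi, ha⟩ | ⟨hi, ha⟩ | ⟨hi, ha⟩ <;> subst hi <;> subst ha <;>
    split_ifs <;> simp_all

theorem pvFilter_rank_three (ks : List String) :
    ks.filter (fun n => pvRank n == 3) = ks.filter (fun n => !(pvGroupOrder.contains n)) := by
  apply List.filter_congr
  intro n _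
  rw [pvRank_eq]
  split_ifs <;> simp_all [pvGroupOrder]

-- an equality filter over a duplicate-free list is a zero/one-element list
theorem pvFilter_eq_singleton (ks : List String) (a : String) (hnd : ks.Nodup) :
    ks.filter (fun n => n == a) = if a ∈ ks then [a] else [] := by
  induction ks with
  | nil => rfl
  | cons y t ih =>
    simp only [List.nodup_cons] at hnd
    by_cases h : y = a
    · subst h
      have ht : t.filter (fun n => n == y) = [] := by
        rw [List.filter_eq_nil_iff]
        intro z hz hbeq
        exact hnd.1 ((by simpa using hbeq : z = y) ▸ hz)
      simp [ht]
    · have hne : ¬ a = y := fun he => h he.symm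
      simp [h, ih hnd.2, hne]

-- a name is a key of the association list iff the dict lookup finds it
theorem pvLookup_isSome (d : List (String × List String)) (a : String) :
    (pvLookup d a).isSome = true ↔ a ∈ d.map Prod.fst := by
  induction d with
  | nil => simp [pvLookup]
  | cons p t ih =>
    by_cases h : p.1 = a
    · simp [pvLookup, h]
    · have hne : a ≠ p.1 := fun he => h he.symm
      simp [pvLookup, h, ih, hne]

-- hints in the table are never the empty string ('if hint:' always fires)
theorem pvHint?_ne_empty (g h : String) (hh : pvHint? g = some h) : h ≠ "" := by
  unfold pvHint? at hh
  split_ifs at hh <;> · injection hh with hh; rw [← hh]; simp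

-- A's loop body appends exactly B's rendered block
theorem pvStepA_eq_append_block (grouped : List (String × List String))
    (acc : List String) (g : String) :
    pvStepA grouped acc g = acc ++ pvBlock g ((pvLookup grouped g).getD []) := by
  unfold pvStepA pvBlock
  by_cases hi : (pvLookup grouped g).getD [] = []
  · simp [hi]
  · simp only [hi, if_false]
    cases hh : pvHint? g with
    | none => simp
    | some h => simp [pvHint?_ne_empty g h hh]

-- ===== VERDICT (by name: the statement is the Claim_ definition above) =====
theorem format_grouped_input_errors_spec : Claim_equal_format_grouped_input_errors := by
  intro grouped _ hpre
  unfold Spec_format_grouped_input_errors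
  unfold format_grouped_input_errors format_grouped_input_errors_alt
  have hfun : pvStepA grouped =
      fun acc g => acc ++ pvBlock g ((pvLookup grouped g).getD []) :=
    funext fun acc => funext fun g => pvStepA_eq_append_block grouped acc g
  rw [hfun, PySem.List.foldl_append_eq_flatMap, List.nil_append]
  congr 1
  -- the group-name orders coincide
  rw [pvSorted_shape,
      pvFilter_rank_known _ 0 "metadata" (Or.inl ⟨rfl, rfl⟩),
      pvFilter_rank_known _ 1 "matrix" (Or.inr (Or.inl ⟨rfl, rfl⟩)),
      pvFilter_rank_known _ 2 "manifest" (Or.inr (Or.inr ⟨rfl, rfl⟩)),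
      pvFilter_rank_three,
      pvFilter_eq_singleton _ _ hpre, pvFilter_eq_singleton _ _ hpre,
      pvFilter_eq_singleton _ _ hpre]
  simp only [← pvLookup_isSome grouped]
  simp only [pvGroupOrder, List.filter]
  cases (pvLookup grouped "metadata").isSome <;>
    cases (pvLookup grouped "matrix").isSome <;>
      cases (pvLookup grouped "manifest").isSome <;> simp
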